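-- pv_equiv track=rewrite | github.com/ICELANF/behavioral-health-project | core/data_visibility_service.py | filter_profile_fields
-- ===== SOURCE A (Python) =====
-- FIELD_VISIBILITY = {
--     "big5_scores": {"min_level": 6, "label": "Big5人格原始分"},          # L5 大师
--     "big5_raw": {"min_level": 6, "label": "Big5人格原始分"},              # L5 大师
--     "psychological_level": {"min_level": 6, "label": "心理健康层级"},      # L5 大师
--     "psychological_level_label": {"min_level": 6, "label": "心理健康层级标签"},  # L5 大师
--     "risk_flags": {"min_level": 4, "label": "风险标记"},                  # L3 教练
--     "spi_score": {"min_level": 4, "label": "SPI分数"},                    # L3 教练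
--     "bpt6_type": {"min_level": 4, "label": "行为类型"},                   # L3 教练
--     "bpt6_scores": {"min_level": 4, "label": "行为类型分数"},              # L3 教练
--     "capacity_weak": {"min_level": 4, "label": "改变能力薄弱项"},          # L3 教练
--     "capacity_strong": {"min_level": 4, "label": "改变能力优势项"},        # L3 教练
--     "capacity_dimensions": {"min_level": 4, "label": "改变能力维度"},      # L3 教练
--     "capacity_total": {"min_level": 4, "label": "改变能力总分"},           # L3 教练
-- }
--
-- def filter_profile_fields(profile_dict: dict, viewer_level: int) -> dict:
--     """
--     根据查看者等级过滤行为画像字段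
--
--     Args:
--         profile_dict: 行为画像字典数据
--         viewer_level: 查看者等级数字 (0~99)
--
--     Returns:
--         过滤后的字典，被限制的字段值设为 None
--     """
--     if not profile_dict:
--         return profile_dict
--
--     filtered = dict(profile_dict)
--
--     for field_name, rules in FIELD_VISIBILITY.items():
--         if field_name in filtered and viewer_level < rules["min_level"]:
--             filtered[field_name] = None
--
--     return filtered
-- ===== SOURCE B (Python) =====
-- FIELD_VISIBILITY = {
--     "big5_scores": {"min_level": 6, "label": "Big5人格原始分"},
--     "big5_raw": {"min_level": 6, "label": "Big5人格原始分"},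
--     "psychological_level": {"min_level": 6, "label": "心理健康层级"},
--     "psychological_level_label": {"min_level": 6, "label": "心理健康层级标签"},
--     "risk_flags": {"min_level": 4, "label": "风险标记"},
--     "spi_score": {"min_level": 4, "label": "SPI分数"},
--     "bpt6_type": {"min_level": 4, "label": "行为类型"},
--     "bpt6_scores": {"min_level": 4, "label": "行为类型分数"},
--     "capacity_weak": {"min_level": 4, "label": "改变能力薄弱项"},
--     "capacity_strong": {"min_level": 4, "label": "改变能力优势项"},
--     "capacity_dimensions": {"min_level": 4, "label": "改变能力维度"},
--     "capacity_total": {"min_level": 4, "label": "改变能力总分"},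
-- }
--
--
-- def filter_profile_fields(profile_dict: dict, viewer_level: int) -> dict:
--     if not profile_dict:
--         return profile_dict
--     return {
--         k: None if (rule := FIELD_VISIBILITY.get(k)) is not None
--                    and viewer_level < rule["min_level"]
--            else v
--         for k, v in profile_dict.items()
--     }
-- ===== Notes on version B (the rewrite author's own statement) =====
-- stated objective: idiomatic
-- what changed: B replaces A's loop over the 12-entry rule table (with a membership test into a mutated copy of the profile) by a single dict comprehension over the profile's own entries with one rule-table lookup per entry; the iterated collection and the maintained state both change.
import Mathlib
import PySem

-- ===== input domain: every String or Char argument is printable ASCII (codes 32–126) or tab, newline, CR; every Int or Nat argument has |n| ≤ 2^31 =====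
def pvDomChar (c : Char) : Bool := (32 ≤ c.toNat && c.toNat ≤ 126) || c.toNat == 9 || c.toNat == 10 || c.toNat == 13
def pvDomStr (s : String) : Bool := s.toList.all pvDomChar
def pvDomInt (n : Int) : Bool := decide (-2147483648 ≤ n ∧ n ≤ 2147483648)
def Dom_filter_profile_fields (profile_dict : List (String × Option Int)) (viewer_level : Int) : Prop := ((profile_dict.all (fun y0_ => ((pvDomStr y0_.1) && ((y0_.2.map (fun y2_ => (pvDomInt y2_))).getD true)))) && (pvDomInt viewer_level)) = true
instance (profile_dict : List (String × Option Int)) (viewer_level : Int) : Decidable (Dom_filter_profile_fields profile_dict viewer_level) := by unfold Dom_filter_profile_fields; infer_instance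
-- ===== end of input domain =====

-- B iterates the profile's own entries with one rule-table lookup each, instead of A's loop
-- over the rule table mutating a copied dict (idiomatic dict comprehension; same cost class).

-- ===== PORT A =====
-- the module constant FIELD_VISIBILITY: field name ↦ (min_level, label)
def FIELD_VISIBILITY : PySem.Dict String (Int × String) := PySem.Dict.ofList [
  ("big5_scores", (6, "Big5人格原始分")),
  ("big5_raw", (6, "Big5人格原始分")),
  ("psychological_level", (6, "心理健康层级")),
  ("psychological_level_label", (6, "心理健康层级标签")),
  ("risk_flags", (4, "风险标记")),
  ("spi_score", (4, "SPI分数")),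
  ("bpt6_type", (4, "行为类型")),
  ("bpt6_scores", (4, "行为类型分数")),
  ("capacity_weak", (4, "改变能力薄弱项")),
  ("capacity_strong", (4, "改变能力优势项")),
  ("capacity_dimensions", (4, "改变能力维度")),
  ("capacity_total", (4, "改变能力总分"))]

def filter_profile_fields (profile_dict : List (String × Option Int)) (viewer_level : Int) : List (String × Option Int) :=
  -- `if not profile_dict: return profile_dict`
  if profile_dict = [] then profile_dict
  else
    -- `filtered = dict(profile_dict)`
    let filtered : PySem.Dict String (Option Int) := PySem.Dict.ofList profile_dict
    -- `for field_name, rules in FIELD_VISIBILITY.items(): if field_name in filtered and viewer_level < rules["min_level"]: filtered[field_name] = None`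
    let filtered := FIELD_VISIBILITY.items.foldl
      (fun d r => if d.contains r.1 && decide (viewer_level < r.2.1) then d.insert r.1 none else d)
      filtered
    filtered.items

-- ===== PORT B =====
def filter_profile_fields_alt (profile_dict : List (String × Option Int)) (viewer_level : Int) : List (String × Option Int) :=
  if profile_dict = [] then profile_dict
  else
    profile_dict.map (fun p =>
      (p.1, match FIELD_VISIBILITY.get? p.1 with
            | some rule => if viewer_level < rule.1 then none else p.2
            | none => p.2))

-- ===== PRECONDITION & SPEC =====
-- The association list encodes a Python dict, whose keys are necessarily distinct; lists with
-- duplicate keys are artifacts of the encoding that the Python function can never receive.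
def Pre_filter_profile_fields (profile_dict : List (String × Option Int)) (viewer_level : Int) : Prop :=
  (profile_dict.map Prod.fst).Nodup
instance (profile_dict : List (String × Option Int)) (viewer_level : Int) : Decidable (Pre_filter_profile_fields profile_dict viewer_level) := by unfold Pre_filter_profile_fields; infer_instance
def pvWitness_filter_profile_fields : (List (String × Option Int)) × Int :=
  ([("risk_flags", some 3), ("name", none), ("big5_scores", some 7)], 2)

def Spec_filter_profile_fields (profile_dict : List (String × Option Int)) (viewer_level : Int) (out : List (String × Option Int)) : Prop := out = filter_profile_fields_alt profile_dict viewer_level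
instance (profile_dict : List (String × Option Int)) (viewer_level : Int) (out : List (String × Option Int)) : Decidable (Spec_filter_profile_fields profile_dict viewer_level out) := by unfold Spec_filter_profile_fields; infer_instance

-- ===== CLAIM (what is proved, stated in full; the proofs are below) =====
def Claim_equal_filter_profile_fields : Prop := ∀ (profile_dict : List (String × Option Int)) (viewer_level : Int), Dom_filter_profile_fields profile_dict viewer_level → Pre_filter_profile_fields profile_dict viewer_level → Spec_filter_profile_fields profile_dict viewer_level (filter_profile_fields profile_dict viewer_level)

-- ===== LEMMAS AND PROOFS =====

-- copying a duplicate-free association list into a dict keeps the items unchanged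
lemma items_ofList_nodup (l : List (String × Option Int)) (h : (l.map Prod.fst).Nodup) :
    (PySem.Dict.ofList l).items = l := by
  have hfresh : ∀ a ∈ l, (PySem.Dict.empty : PySem.Dict String (Option Int)).contains a.1 = false := by
    intro a _; simp [pysem]
  have hmain := PySem.Dict.items_foldl_insert_fresh l Prod.fst Prod.snd PySem.Dict.empty hfresh h
  simpa [PySem.Dict.ofList, PySem.Dict.update] using hmain

-- A's loop over the rule table rewrites each profile item according to whether SOME table
-- entry matches its key with a level below the threshold
lemma loop_items (viewer_level : Int) (table : List (String × Int × String))
    (d : PySem.Dict String (Option Int)) :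
    (table.foldl
      (fun d r => if d.contains r.1 && decide (viewer_level < r.2.1) then d.insert r.1 none else d)
      d).items
    = d.items.map (fun p =>
        if table.any (fun r => p.1 == r.1 && decide (viewer_level < r.2.1)) then (p.1, none) else p) := by
  induction table generalizing d with
  | nil => simp
  | cons r t ih =>
    simp only [List.foldl_cons]
    by_cases hg : (d.contains r.1 && decide (viewer_level < r.2.1)) = true
    · obtain ⟨h1, h2⟩ : d.contains r.1 = true ∧ viewer_level < r.2.1 := by simpa using hg
      rw [if_pos hg, ih, PySem.Dict.items_insert_of_contains _ none h1, List.map_map]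
      refine List.map_congr_left (fun p _ => ?_)
      by_cases hk : (p.1 == r.1) = true
      · have hp : p.1 = r.1 := eq_of_beq hk
        simp [hp, h2, List.any_cons]
      · have hne : (p.1 == r.1) = false := by revert hk; cases (p.1 == r.1) <;> simp
        simp only [Function.comp_apply, List.any_cons, hne, Bool.false_and, Bool.false_or,
          Bool.false_eq_true, if_false]
    · rw [if_neg hg, ih]
      rcases Bool.and_eq_false_iff.mp (Bool.not_eq_true _ ▸ hg) with h1 | h2
      · -- r.1 is not a key of d: the head table entry touches no item
        refine List.map_congr_left (fun p hp => ?_)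
        have hne : (p.1 == r.1) = false := by
          refine beq_eq_false_iff_ne.mpr (fun he => ?_)
          have : d.contains r.1 = true := by
            rw [PySem.Dict.contains_iff_mem_keys]
            exact he ▸ List.mem_map_of_mem hp
          simp [this] at h1
        simp only [List.any_cons, hne, Bool.false_and, Bool.false_or]
      · -- the level test fails: the head table entry changes nothing
        refine List.map_congr_left (fun p _ => ?_)
        simp only [List.any_cons, h2, Bool.and_false, Bool.false_or]

-- a "some matching entry" scan over a duplicate-free table is the dict lookup
lemma any_eq_get (d : PySem.Dict String (Int × String)) (hnd : d.keys.Nodup) (k : String) (viewer_level : Int) :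
    d.items.any (fun r => k == r.1 && decide (viewer_level < r.2.1))
    = (match d.get? k with | some rule => decide (viewer_level < rule.1) | none => false) := by
  obtain ⟨l⟩ := d
  simp only [PySem.Dict.keys_mk] at hnd
  induction l with
  | nil => simp [PySem.Dict.get?]
  | cons a t ih =>
    rw [PySem.Dict.get?_mk_cons]
    by_cases hak : (a.1 == k) = true
    · have ha : a.1 = k := eq_of_beq hak
      have hnotin : k ∉ t.map Prod.fst := by
        simp only [List.map_cons, List.nodup_cons] at hnd
        exact ha ▸ hnd.1
      have htail : t.any (fun r => k == r.1 && decide (viewer_level < r.2.1)) = false := by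
        refine List.any_eq_false.mpr (fun r hr => ?_)
        simp only [Bool.and_eq_true, not_and]
        intro hkr _
        exact hnotin ((eq_of_beq hkr) ▸ List.mem_map_of_mem hr)
      simp [List.any_cons, htail, ha]
    · have hka : (k == a.1) = false := by
        refine beq_eq_false_iff_ne.mpr (fun he => ?_)
        simp [he] at hak
      simp only [List.map_cons, List.nodup_cons] at hnd
      have := ih hnd.2
      simp [List.any_cons, hka, hak, this]

-- ===== VERDICT (by name: the statement is the Claim_ definition above) =====
theorem filter_profile_fields_spec : Claim_equal_filter_profile_fields := by
  intro pd lvl _ hpre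
  unfold Spec_filter_profile_fields filter_profile_fields filter_profile_fields_alt
  by_cases h : pd = []
  · simp [h]
  · simp only [if_neg h]
    rw [loop_items, items_ofList_nodup pd hpre]
    apply List.map_congr_left
    intro p _
    rw [any_eq_get FIELD_VISIBILITY (by decide) p.1 lvl]
    rcases hg : FIELD_VISIBILITY.get? p.1 with _ | rule
    · simp
    · by_cases hl : lvl < rule.1 <;> simp [hl]
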